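-- pv_equiv track=rewrite | github.com/0seba/coremlmodels | src/coremlmodels/analysis.py | parse_mil_args
-- ===== SOURCE A (Python) =====
-- def parse_mil_args(args_str):
--     """
--     Parses a comma-separated argument string, respecting nested parentheses/brackets.
--     Returns a list of split strings.
--     """
--     args = []
--     current = []
--     level = 0
--
--     for char in args_str:
--         if char in "([{":
--             level += 1
--             current.append(char)
--         elif char in ")]}":
--             level -= 1
--             current.append(char)
--         elif char == "," and level == 0:
--             args.append("".join(current).strip())
--             current = []
--         else:
--             current.append(char)
--
--     if current:
--         args.append("".join(current).strip())
--
--     return args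
-- ===== SOURCE B (Python) =====
-- def _split_top(s):
--     """Return (head, rest) around the first top-level comma of s, or None."""
--     level = 0
--     pre = []
--     for j, ch in enumerate(s):
--         if ch in "([{":
--             level += 1
--             pre.append(ch)
--         elif ch in ")]}":
--             level -= 1
--             pre.append(ch)
--         elif ch == "," and level == 0:
--             return "".join(pre), s[j + 1:]
--         else:
--             pre.append(ch)
--     return None
--
--
-- def parse_mil_args(args_str):
--     """
--     Parses a comma-separated argument string, respecting nested parentheses/brackets.
--     Returns a list of split strings.
--     """
--     parts = []
--     s = args_str
--     while True:
--         pr = _split_top(s)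
--         if pr is None:
--             break
--         head, s = pr
--         parts.append(head.strip())
--     if s:
--         parts.append(s.strip())
--     return parts
-- ===== Notes on version B (the rewrite author's own statement) =====
-- stated objective: alternative
-- what changed: A does one pass with a three-field accumulator (collected args, current char buffer, level) and a trailing flush; B repeatedly searches the remaining string for its first top-level comma with a stateless helper and splits it off, so the main loop works on whole substrings and keeps no cross-iteration level/buffer state.
import Mathlib
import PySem

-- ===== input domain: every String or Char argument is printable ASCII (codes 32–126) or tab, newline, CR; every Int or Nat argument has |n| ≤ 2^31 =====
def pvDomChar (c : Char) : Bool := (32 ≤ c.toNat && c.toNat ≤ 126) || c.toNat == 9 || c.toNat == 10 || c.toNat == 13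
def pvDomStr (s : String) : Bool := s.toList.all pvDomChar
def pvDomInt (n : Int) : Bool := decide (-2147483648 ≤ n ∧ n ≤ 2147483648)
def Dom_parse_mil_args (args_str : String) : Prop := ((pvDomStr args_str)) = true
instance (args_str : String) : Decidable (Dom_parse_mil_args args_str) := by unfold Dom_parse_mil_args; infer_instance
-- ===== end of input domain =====

-- B replaces A's single pass with a (args, buffer, level) accumulator by repeated stateless
-- search-and-split at the first top-level comma of the remaining substring (alternative decomposition).


-- ===== PORT A =====
-- the for-loop of A as structural recursion over the characters, with A's state (args, current, level)
def pvAGo (args : List String) (current : List Char) (level : Int) : List Char → List String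
  | [] => if current = [] then args else args ++ [PySem.Str.strip (String.mk current)]
  | c :: cs =>
    if c ∈ ['(', '[', '{'] then pvAGo args (current ++ [c]) (level + 1) cs
    else if c ∈ [')', ']', '}'] then pvAGo args (current ++ [c]) (level - 1) cs
    else if c = ',' ∧ level = 0 then pvAGo (args ++ [PySem.Str.strip (String.mk current)]) [] level cs
    else pvAGo args (current ++ [c]) level cs

def parse_mil_args (args_str : String) : List String :=
  pvAGo [] [] 0 args_str.toList

-- ===== PORT B =====
-- helper _split_top: first top-level comma of s → some (head, rest), else none
def pvSplitTop (pre : List Char) (level : Int) : List Char → Option (List Char × List Char)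
  | [] => none
  | c :: cs =>
    if c ∈ ['(', '[', '{'] then pvSplitTop (pre ++ [c]) (level + 1) cs
    else if c ∈ [')', ']', '}'] then pvSplitTop (pre ++ [c]) (level - 1) cs
    else if c = ',' ∧ level = 0 then some (pre, cs)
    else pvSplitTop (pre ++ [c]) level cs

-- termination of B's while-loop: the rest returned by _split_top is strictly shorter
theorem pvSplitTop_length (cs : List Char) : ∀ (pre : List Char) (level : Int) (h r : List Char),
    pvSplitTop pre level cs = some (h, r) → r.length < cs.length := by
  induction cs with
  | nil => intro pre level h r hx; simp [pvSplitTop] at hx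
  | cons c cs ih =>
    intro pre level h r hx
    simp only [pvSplitTop] at hx
    split_ifs at hx with h1 h2 h3
    · exact Nat.lt_trans (ih _ _ _ _ hx) (by simp)
    · exact Nat.lt_trans (ih _ _ _ _ hx) (by simp)
    · cases hx; simp
    · exact Nat.lt_trans (ih _ _ _ _ hx) (by simp)

-- B's while-loop: split off heads while a top-level comma exists, then flush a nonempty rest
def pvBLoop (parts : List String) (s : List Char) : List String :=
  match hx : pvSplitTop [] 0 s with
  | some (hd, r) => pvBLoop (parts ++ [PySem.Str.strip (String.mk hd)]) r
  | none => if s = [] then parts else parts ++ [PySem.Str.strip (String.mk s)]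
termination_by s.length
decreasing_by exact pvSplitTop_length _ _ _ _ _ hx

def parse_mil_args_alt (args_str : String) : List String :=
  pvBLoop [] args_str.toList

-- ===== PRECONDITION & SPEC =====
def Spec_parse_mil_args (args_str : String) (out : List String) : Prop := out = parse_mil_args_alt args_str
instance (args_str : String) (out : List String) : Decidable (Spec_parse_mil_args args_str out) := by unfold Spec_parse_mil_args; infer_instance

-- ===== CLAIM (what is proved, stated in full; the proofs are below) =====
def Claim_equal_parse_mil_args : Prop := ∀ (args_str : String), Dom_parse_mil_args args_str → Spec_parse_mil_args args_str (parse_mil_args args_str)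

-- ===== LEMMAS AND PROOFS =====

-- one-step unfolding of B's while-loop
theorem pvBLoop_eq (parts : List String) (s : List Char) :
    pvBLoop parts s =
      match pvSplitTop [] 0 s with
      | some (hd, r) => pvBLoop (parts ++ [PySem.Str.strip (String.mk hd)]) r
      | none => if s = [] then parts else parts ++ [PySem.Str.strip (String.mk s)] := by
  rw [pvBLoop]
  rcases hx : pvSplitTop [] 0 s with _ | ⟨hd, r⟩ <;> rfl

-- A's loop from state (args, pre, level) equals: split the scan at the first top-level comma
theorem pvAGo_eq (cs : List Char) : ∀ (pre : List Char) (level : Int) (args : List String),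
    pvAGo args pre level cs =
      match pvSplitTop pre level cs with
      | some (hd, r) => pvBLoop (args ++ [PySem.Str.strip (String.mk hd)]) r
      | none => if pre ++ cs = [] then args else args ++ [PySem.Str.strip (String.mk (pre ++ cs))] := by
  induction cs with
  | nil => intro pre level args; simp [pvAGo, pvSplitTop]
  | cons c cs ih =>
    intro pre level args
    by_cases h1 : c ∈ ['(', '[', '{']
    · simp only [pvAGo, pvSplitTop, if_pos h1]
      rw [ih]
      rcases pvSplitTop (pre ++ [c]) (level + 1) cs with _ | ⟨hd, r⟩ <;> simp
    · by_cases h2 : c ∈ [')', ']', '}']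
      · simp only [pvAGo, pvSplitTop, if_neg h1, if_pos h2]
        rw [ih]
        rcases pvSplitTop (pre ++ [c]) (level - 1) cs with _ | ⟨hd, r⟩ <;> simp
      · by_cases h3 : c = ',' ∧ level = 0
        · obtain ⟨rfl, rfl⟩ := h3
          simp only [pvAGo, pvSplitTop, if_neg h1, if_neg h2, and_self, if_true]
          rw [ih, pvBLoop_eq]
          rcases pvSplitTop [] 0 cs with _ | ⟨hd, r⟩ <;> simp
        · simp only [pvAGo, pvSplitTop, if_neg h1, if_neg h2, if_neg h3]
          rw [ih]
          rcases pvSplitTop (pre ++ [c]) level cs with _ | ⟨hd, r⟩ <;> simp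

-- ===== VERDICT (by name: the statement is the Claim_ definition above) =====
theorem parse_mil_args_spec : Claim_equal_parse_mil_args := by
  intro s _
  unfold Spec_parse_mil_args parse_mil_args parse_mil_args_alt
  rw [pvAGo_eq, pvBLoop_eq]
  rcases pvSplitTop [] 0 s.toList with _ | ⟨hd, r⟩ <;> simp
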